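-- pv_equiv track=rewrite | github.com/pombredanne/launchpad-3 | database/schema/security.py | _split_postgres_aclitem
-- ===== SOURCE A (Python) =====
-- def _split_postgres_aclitem(aclitem):
--     """Split a PostgreSQL aclitem textual representation.
--
--     Returns the (grantee, privs, grantor), unquoted and separated.
--     """
--     components = {'grantee': '', 'privs': '', 'grantor': ''}
--     current_component = 'grantee'
--     inside_quoted = False
--     maybe_finished_quoted = False
--     for char in aclitem:
--         if inside_quoted:
--             if maybe_finished_quoted:
--                 maybe_finished_quoted = False
--                 if char == '"':
--                     components[current_component] += '"'
--                     continue
--                 else: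
--                     inside_quoted = False
--             elif char == '"':
--                 maybe_finished_quoted = True
--                 continue
--         # inside_quoted may have just been made False, so no else block
--         # for you.
--         if not inside_quoted:
--             if char == '"':
--                 inside_quoted = True
--                 continue
--             elif char == '=':
--                 current_component = 'privs'
--                 continue
--             elif char == '/':
--                 current_component = 'grantor'
--                 continue
--         components[current_component] += char
--     return components['grantee'], components['privs'], components['grantor']
-- ===== SOURCE B (Python) =====
-- def _split_postgres_aclitem(aclitem):
--     """Split a PostgreSQL aclitem textual representation.
--
--     Returns the (grantee, privs, grantor), unquoted and separated.
--     """
--     parts = ['', '', '']  # grantee, privs, grantor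
--     target = 0
--     i = 0
--     n = len(aclitem)
--     while i < n:
--         char = aclitem[i]
--         if char == '"':
--             # Consume the whole quoted literal, '""' meaning one '"'.
--             i += 1
--             while i < n:
--                 if aclitem[i] != '"':
--                     parts[target] += aclitem[i]
--                     i += 1
--                 elif i + 1 < n and aclitem[i + 1] == '"':
--                     parts[target] += '"'
--                     i += 2
--                 else:
--                     i += 1
--                     break
--         elif char == '=':
--             target = 1
--             i += 1
--         elif char == '/':
--             target = 2
--             i += 1
--         else:
--             parts[target] += char
--             i += 1
--     return tuple(parts)
-- ===== Notes on version B (the rewrite author's own statement) =====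
-- stated objective: alternative
-- what changed: Replaces A's per-character four-variable state machine (dict of components + current_component + inside_quoted + maybe_finished_quoted flags) with a cursor-based scan that consumes each whole quoted literal in a dedicated inner loop and keeps the three fields in an indexed list.
import Mathlib
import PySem

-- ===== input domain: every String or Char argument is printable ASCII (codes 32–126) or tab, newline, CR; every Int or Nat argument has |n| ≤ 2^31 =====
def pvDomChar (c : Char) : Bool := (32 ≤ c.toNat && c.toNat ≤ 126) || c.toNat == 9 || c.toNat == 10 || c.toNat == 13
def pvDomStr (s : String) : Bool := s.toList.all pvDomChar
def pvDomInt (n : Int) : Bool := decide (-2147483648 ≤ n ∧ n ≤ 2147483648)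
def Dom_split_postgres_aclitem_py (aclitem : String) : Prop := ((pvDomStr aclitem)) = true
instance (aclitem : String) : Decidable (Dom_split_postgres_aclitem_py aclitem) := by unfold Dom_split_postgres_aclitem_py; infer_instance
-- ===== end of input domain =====

-- B restructures A's four-variable character state machine as an index/cursor scan that consumes
-- each whole quoted literal in a dedicated inner loop (objective: simpler decomposition, same cost).

-- ===== PORT A =====
-- Strings are modelled on the List Char side (PySem convention); the components dict is a
-- PySem.Dict String (List Char). 'components[cur] += ch' is 'd.modify cur [] (· ++ [ch])'
-- (keys are always present, so the default is never read).

-- the for-loop of A: state = (dict, current_component, inside_quoted, maybe_finished_quoted)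
def pvALoop (cs : List Char) (d : PySem.Dict String (List Char)) (cur : String)
    (inside maybe : Bool) : String × String × String :=
  match cs with
  | [] => (String.ofList (d.getD "grantee" []), String.ofList (d.getD "privs" []),
           String.ofList (d.getD "grantor" []))
  | c :: rest =>
    if inside then
      if maybe then
        if c = '"' then pvALoop rest (d.modify cur [] (· ++ ['"'])) cur true false
        else -- inside_quoted just became False: fall through to the not-inside block
          if c = '"' then pvALoop rest d cur true false
          else if c = '=' then pvALoop rest d "privs" false false
          else if c = '/' then pvALoop rest d "grantor" false false
          else pvALoop rest (d.modify cur [] (· ++ [c])) cur false false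
      else if c = '"' then pvALoop rest d cur true true
      else pvALoop rest (d.modify cur [] (· ++ [c])) cur true false
    else
      if c = '"' then pvALoop rest d cur true false
      else if c = '=' then pvALoop rest d "privs" false false
      else if c = '/' then pvALoop rest d "grantor" false false
      else pvALoop rest (d.modify cur [] (· ++ [c])) cur false false

def split_postgres_aclitem_py (aclitem : String) : String × String × String :=
  pvALoop aclitem.toList
    (PySem.Dict.ofList [("grantee", []), ("privs", []), ("grantor", [])]) "grantee" false false

-- ===== PORT B =====
-- parts is the 3-element list ['', '', ''] (grantee, privs, grantor), target an index into it;
-- the while-loops over the string index become recursion consuming the remaining characters.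

-- inner while-loop of B: consume a quoted literal ('""' → '"'), stop past the closing quote
def pvBQuoted (parts : List (List Char)) (t : Nat) (cs : List Char) :
    List (List Char) × List Char :=
  match cs with
  | [] => (parts, [])
  | c :: rest =>
    if c ≠ '"' then pvBQuoted (parts.set t (parts.getD t [] ++ [c])) t rest
    else
      match rest with
      | '"' :: rest' => pvBQuoted (parts.set t (parts.getD t [] ++ ['"'])) t rest'
      | _ => (parts, rest)

-- termination helper for the outer loop (cited by name in decreasing_by)
theorem pvBQuoted_len_le (parts : List (List Char)) (t : Nat) (cs : List Char) :
    (pvBQuoted parts t cs).2.length ≤ cs.length := by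
  fun_induction pvBQuoted parts t cs <;> simp_all <;> omega

-- outer while-loop of B
def pvBLoop (parts : List (List Char)) (t : Nat) (cs : List Char) :
    String × String × String :=
  match cs with
  | [] => (String.ofList (parts.getD 0 []), String.ofList (parts.getD 1 []), String.ofList (parts.getD 2 []))
  | c :: rest =>
    if c = '"' then
      let q := pvBQuoted parts t rest
      pvBLoop q.1 t q.2
    else if c = '=' then pvBLoop parts 1 rest
    else if c = '/' then pvBLoop parts 2 rest
    else pvBLoop (parts.set t (parts.getD t [] ++ [c])) t rest
termination_by cs.length
decreasing_by
  · exact Nat.lt_succ_of_le (pvBQuoted_len_le parts t rest)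
  all_goals simp

def split_postgres_aclitem_py_alt (aclitem : String) : String × String × String :=
  pvBLoop [[], [], []] 0 aclitem.toList

-- ===== PRECONDITION & SPEC =====
def Spec_split_postgres_aclitem_py (aclitem : String) (out : String × String × String) : Prop := out = split_postgres_aclitem_py_alt aclitem
instance (aclitem : String) (out : String × String × String) : Decidable (Spec_split_postgres_aclitem_py aclitem out) := by unfold Spec_split_postgres_aclitem_py; infer_instance

-- ===== CLAIM (what is proved, stated in full; the proofs are below) =====
def Claim_equal_split_postgres_aclitem_py : Prop := ∀ (aclitem : String), Dom_split_postgres_aclitem_py aclitem → Spec_split_postgres_aclitem_py aclitem (split_postgres_aclitem_py aclitem)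

-- ===== LEMMAS AND PROOFS =====

-- the dict A maintains, as a function of its three values
def pvMkD (g p r : List Char) : PySem.Dict String (List Char) :=
  PySem.Dict.ofList [("grantee", g), ("privs", p), ("grantor", r)]

-- A's current_component name for B's target index
def pvCname : Nat → String
  | 0 => "grantee"
  | 1 => "privs"
  | _ => "grantor"

theorem pvModify_grantee (g p r : List Char) (f : List Char → List Char) :
    (pvMkD g p r).modify "grantee" [] f = pvMkD (f g) p r := rfl
theorem pvModify_privs (g p r : List Char) (f : List Char → List Char) :
    (pvMkD g p r).modify "privs" [] f = pvMkD g (f p) r := rfl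
theorem pvModify_grantor (g p r : List Char) (f : List Char → List Char) :
    (pvMkD g p r).modify "grantor" [] f = pvMkD g p (f r) := rfl

-- one modify step on pvMkD at pvCname t = one set step on the 3-list, for each t < 3
theorem pvStep_corr (g p r : List Char) (t : Nat) (ht : t < 3) (x : Char) :
    (pvMkD g p r).modify (pvCname t) [] (· ++ [x]) =
      (match ([g, p, r].set t ([g, p, r].getD t [] ++ [x])) with
        | [g', p', r'] => pvMkD g' p' r'
        | _ => pvMkD g p r) := by
  interval_cases t <;> simp [pvCname, pvModify_grantee, pvModify_privs, pvModify_grantor]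

-- main invariant: A's loop in each of its three modes against B's two loops
theorem pvMain (n : Nat) :
    ∀ cs : List Char, cs.length ≤ n → ∀ t g p r, t < 3 →
      (pvALoop cs (pvMkD g p r) (pvCname t) false false = pvBLoop [g, p, r] t cs) ∧
      (pvALoop cs (pvMkD g p r) (pvCname t) true false =
        pvBLoop (pvBQuoted [g, p, r] t cs).1 t (pvBQuoted [g, p, r] t cs).2) := by
  induction n with
  | zero =>
    intro cs hcs t g p r ht
    have : cs = [] := List.eq_nil_of_length_eq_zero (Nat.le_zero.mp hcs)
    subst this
    constructor <;> (simp only [pvBLoop, pvBQuoted]; rfl)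
  | succ n ih =>
    intro cs hcs t g p r ht
    match cs with
    | [] => constructor <;> (simp only [pvBLoop, pvBQuoted]; rfl)
    | c :: rest =>
      have hrest : rest.length ≤ n := by simpa using Nat.lt_succ_iff.mp (Nat.lt_of_lt_of_le (by simp) hcs)
      constructor
      · -- outside-quotes mode
        by_cases hq : c = '"'
        · subst hq
          simp only [pvALoop, pvBLoop, reduceIte]
          exact (ih rest hrest t g p r ht).2
        · by_cases he : c = '='
          · subst he
            simp only [pvALoop, pvBLoop]
            norm_num
            exact (ih rest hrest 1 g p r (by omega)).1
          · by_cases hs : c = '/'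
            · subst hs
              simp only [pvALoop, pvBLoop]
              norm_num
              have := (ih rest hrest 2 g p r (by omega)).1
              simpa [pvCname] using this
            · simp only [pvALoop, pvBLoop, if_neg hq, if_neg he, if_neg hs]
              rw [pvStep_corr g p r t ht c]
              interval_cases t <;>
                simpa [pvCname] using (ih rest hrest _ _ _ _ (by omega)).1
      · -- inside-quotes mode (A: inside ∧ ¬maybe; B: inside pvBQuoted)
        by_cases hq : c = '"'
        · subst hq
          -- A moves to the maybe state; B looks one character ahead
          match rest with
          | [] =>
            simp only [pvALoop, pvBQuoted, pvBLoop, reduceIte, Bool.false_eq_true, if_false,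
              ne_eq, not_true_eq_false]
            rfl
          | c' :: rest' =>
            have hr' : rest'.length ≤ n := by simp at hcs; omega
            by_cases hq' : c' = '"'
            · subst hq'
              simp only [pvALoop, pvBQuoted, reduceIte]
              rw [pvStep_corr g p r t ht '"']
              interval_cases t <;>
                simpa [pvCname] using (ih rest' hr' _ _ _ _ (by omega)).2
            · -- quote closed; A reprocesses c' in outside mode = one unfolding of P on c'::rest'
              have hP := (ih (c' :: rest') (by simp at hcs ⊢; omega) t g p r ht).1
              have hBQ : pvBQuoted [g, p, r] t ('"' :: c' :: rest') = ([g, p, r], c' :: rest') := by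
                unfold pvBQuoted
                simp only [ne_eq, not_true_eq_false, ite_false]
                split
                · rename_i h; simp_all
                · rfl
              rw [hBQ]
              calc pvALoop ('"' :: c' :: rest') (pvMkD g p r) (pvCname t) true false
                  = pvALoop (c' :: rest') (pvMkD g p r) (pvCname t) true true := by
                    simp only [pvALoop, reduceIte, Bool.false_eq_true, if_false]
                _ = pvALoop (c' :: rest') (pvMkD g p r) (pvCname t) false false := by
                    simp only [pvALoop, reduceIte, Bool.false_eq_true, if_false, if_neg hq']
                _ = pvBLoop [g, p, r] t (c' :: rest') := hP
        · -- ordinary char inside quotes: appended on both sides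
          have h1 : rest.length ≤ n := hrest
          have hstep : pvBQuoted [g, p, r] t (c :: rest) =
              pvBQuoted ([g, p, r].set t ([g, p, r].getD t [] ++ [c])) t rest := by
            conv_lhs => rw [pvBQuoted.eq_def]
            simp only [ne_eq, hq, not_false_eq_true, if_true]
          simp only [pvALoop, if_neg hq, reduceIte, Bool.false_eq_true, if_false]
          rw [pvStep_corr g p r t ht c, hstep]
          interval_cases t <;>
            simpa [pvCname] using (ih rest h1 _ _ _ _ (by omega)).2

-- ===== VERDICT (by name: the statement is the Claim_ definition above) =====
theorem split_postgres_aclitem_py_spec : Claim_equal_split_postgres_aclitem_py := by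
  intro aclitem _
  unfold Spec_split_postgres_aclitem_py split_postgres_aclitem_py split_postgres_aclitem_py_alt
  have := (pvMain aclitem.toList.length aclitem.toList le_rfl 0 [] [] [] (by omega)).1
  simpa [pvMkD, pvCname] using this
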